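-- pv_equiv track=rewrite | github.com/linkcheng/python_demo | algorithm_demo/algorithm_demo.py | binary_search_last_le
-- ===== SOURCE A (Python) =====
-- def binary_search_last_le(arr, key):
--     """最后一个 <= key 的元素的位置"""
--     left = 0
--     right = len(arr) - 1
--
--     while left <= right:
--         mid = left + ((right-left) >> 1)
--         if arr[mid] <= key:
--             left = mid + 1
--         else:
--             right = mid - 1
--
--     if right < 0:
--         return -1
--     else:
--         return right
-- ===== SOURCE B (Python) =====
-- def binary_search_last_le(arr, key):
--     """最后一个 <= key 的元素的位置 (recursive divide-and-conquer)"""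
--     def go(lo, hi):
--         if lo > hi:
--             return hi
--         mid = (lo + hi) // 2
--         if arr[mid] <= key:
--             return go(mid + 1, hi)
--         return go(lo, mid - 1)
--     return go(0, len(arr) - 1)
-- ===== Notes on version B (the rewrite author's own statement) =====
-- stated objective: alternative
-- what changed: The iterative while-loop threading left/right state plus the final right<0 check is replaced by a recursive divide-and-conquer helper go(lo,hi) that returns hi at the base case (which is -1 exactly in the all-greater/empty case), with the midpoint computed as (lo+hi)//2 instead of lo+((hi-lo)>>1).
import Mathlib
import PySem

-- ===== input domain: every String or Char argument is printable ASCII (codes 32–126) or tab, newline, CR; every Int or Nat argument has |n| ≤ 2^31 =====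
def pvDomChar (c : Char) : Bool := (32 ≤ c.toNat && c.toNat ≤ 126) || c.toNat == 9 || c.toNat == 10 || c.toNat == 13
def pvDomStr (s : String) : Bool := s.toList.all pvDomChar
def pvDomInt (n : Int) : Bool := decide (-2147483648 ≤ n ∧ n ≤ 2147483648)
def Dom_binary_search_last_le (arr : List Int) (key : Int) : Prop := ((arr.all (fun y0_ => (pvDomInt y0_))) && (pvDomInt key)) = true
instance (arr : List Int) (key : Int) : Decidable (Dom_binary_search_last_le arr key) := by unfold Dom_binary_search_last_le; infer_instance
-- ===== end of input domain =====

-- B replaces A's iterative while-loop (left/right state plus a final right<0 check) by a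
-- recursive divide-and-conquer helper returning hi at the base case; same result on every input.

-- ===== PORT A =====
-- the while-loop of A: state (left, right), returns the final value of right.
-- arr[mid] is ported as (pyGet? …).getD 0; the loop only ever indexes in range (0 ≤ left ≤ mid ≤ right < len),
-- so this is exact on every reachable call.
def pvLoopA (arr : List Int) (key : Int) (left right : Int) : Int :=
  if _h : left ≤ right then
    let mid := left + ((right - left) >>> (1 : Nat))
    if (PySem.List.pyGet? arr mid).getD 0 ≤ key then
      pvLoopA arr key (mid + 1) right
    else
      pvLoopA arr key left (mid - 1)
  else right
termination_by (right + 1 - left).toNat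
decreasing_by
  all_goals
    have hs : (right - left) >>> (1 : Nat) = (right - left) / 2 := by
      have := Int.shiftRight_eq_div_pow (right - left) 1
      simpa using this
    simp only [hs] at *
    omega

def binary_search_last_le (arr : List Int) (key : Int) : Int :=
  let right := pvLoopA arr key 0 ((arr.length : Int) - 1)
  if right < 0 then -1 else right

-- ===== PORT B =====
-- recursive helper go(lo, hi); arr[mid] again via (pyGet? …).getD 0, exact on every reachable call.
def pvGoB (arr : List Int) (key : Int) (lo hi : Int) : Int :=
  if _h : lo > hi then hi
  else
    let mid := PySem.Int.floordiv (lo + hi) 2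
    if (PySem.List.pyGet? arr mid).getD 0 ≤ key then
      pvGoB arr key (mid + 1) hi
    else
      pvGoB arr key lo (mid - 1)
termination_by (hi + 1 - lo).toNat
decreasing_by
  all_goals
    have hb := PySem.Int.floordiv_two_mid_bounds (lo := lo) (hi := hi) (by omega)
    omega

def binary_search_last_le_alt (arr : List Int) (key : Int) : Int :=
  pvGoB arr key 0 ((arr.length : Int) - 1)

-- ===== PRECONDITION & SPEC =====
def Spec_binary_search_last_le (arr : List Int) (key : Int) (out : Int) : Prop := out = binary_search_last_le_alt arr key
instance (arr : List Int) (key : Int) (out : Int) : Decidable (Spec_binary_search_last_le arr key out) := by unfold Spec_binary_search_last_le; infer_instance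

-- ===== CLAIM (what is proved, stated in full; the proofs are below) =====
def Claim_equal_binary_search_last_le : Prop := ∀ (arr : List Int) (key : Int), Dom_binary_search_last_le arr key → Spec_binary_search_last_le arr key (binary_search_last_le arr key)

-- ===== LEMMAS AND PROOFS =====

-- (right - left) >> 1 is floor division by 2
theorem pv_shr_one (a : Int) : a >>> (1 : Nat) = a / 2 := by
  simpa using Int.shiftRight_eq_div_pow a 1

-- A's midpoint left + ((right-left) >> 1) equals B's (left+right) // 2.
theorem pv_mid_eq (l r : Int) :
    l + ((r - l) >>> (1 : Nat)) = PySem.Int.floordiv (l + r) 2 := by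
  rw [pv_shr_one, PySem.Int.floordiv_eq_ediv_of_pos (by omega : (0:Int) < 2)]
  omega

-- the two recursions compute the same value from any state
theorem pv_loop_eq_go (arr : List Int) (key : Int) :
    ∀ l r : Int, pvLoopA arr key l r = pvGoB arr key l r := by
  intro l r
  induction l, r using pvLoopA.induct arr key with
  | case1 l r h mid hle ih =>
      rw [pvLoopA, dif_pos h, pvGoB, dif_neg (by omega : ¬ l > r)]
      show (if (PySem.List.pyGet? arr mid).getD 0 ≤ key then pvLoopA arr key (mid + 1) r
            else pvLoopA arr key l (mid - 1)) = _
      have hm : PySem.Int.floordiv (l + r) 2 = mid := (pv_mid_eq l r).symm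
      rw [if_pos hle]
      show _ = (if (PySem.List.pyGet? arr (PySem.Int.floordiv (l + r) 2)).getD 0 ≤ key then
                  pvGoB arr key (PySem.Int.floordiv (l + r) 2 + 1) r
                else pvGoB arr key l (PySem.Int.floordiv (l + r) 2 - 1))
      rw [hm, if_pos hle]
      exact ih
  | case2 l r h mid hle ih =>
      rw [pvLoopA, dif_pos h, pvGoB, dif_neg (by omega : ¬ l > r)]
      show (if (PySem.List.pyGet? arr mid).getD 0 ≤ key then pvLoopA arr key (mid + 1) r
            else pvLoopA arr key l (mid - 1)) = _
      have hm : PySem.Int.floordiv (l + r) 2 = mid := (pv_mid_eq l r).symm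
      rw [if_neg hle]
      show _ = (if (PySem.List.pyGet? arr (PySem.Int.floordiv (l + r) 2)).getD 0 ≤ key then
                  pvGoB arr key (PySem.Int.floordiv (l + r) 2 + 1) r
                else pvGoB arr key l (PySem.Int.floordiv (l + r) 2 - 1))
      rw [hm, if_neg hle]
      exact ih
  | case3 l r h =>
      rw [pvLoopA, dif_neg h, pvGoB, dif_pos (by omega : l > r)]

-- the loop's result is ≥ -1 whenever 0 ≤ left and -1 ≤ right
theorem pv_loop_ge (arr : List Int) (key : Int) :
    ∀ l r : Int, 0 ≤ l → -1 ≤ r → -1 ≤ pvLoopA arr key l r := by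
  intro l r
  induction l, r using pvLoopA.induct arr key with
  | case1 l r h mid hle ih =>
      intro hl hr
      have hmid : l ≤ mid := by
        show l ≤ l + (r - l) >>> (1 : Nat)
        rw [pv_shr_one]
        omega
      rw [pvLoopA, dif_pos h]
      show -1 ≤ if (PySem.List.pyGet? arr mid).getD 0 ≤ key then pvLoopA arr key (mid + 1) r
                else pvLoopA arr key l (mid - 1)
      rw [if_pos hle]
      exact ih (by omega) (by omega)
  | case2 l r h mid hle ih =>
      intro hl hr
      have hmid : l ≤ mid := by
        show l ≤ l + (r - l) >>> (1 : Nat)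
        rw [pv_shr_one]
        omega
      rw [pvLoopA, dif_pos h]
      show -1 ≤ if (PySem.List.pyGet? arr mid).getD 0 ≤ key then pvLoopA arr key (mid + 1) r
                else pvLoopA arr key l (mid - 1)
      rw [if_neg hle]
      exact ih hl (by omega)
  | case3 l r h =>
      intro hl hr
      rw [pvLoopA, dif_neg h]
      exact hr

-- ===== VERDICT (by name: the statement is the Claim_ definition above) =====
theorem binary_search_last_le_spec : Claim_equal_binary_search_last_le := by
  intro arr key _
  unfold Spec_binary_search_last_le binary_search_last_le binary_search_last_le_alt
  have hge := pv_loop_ge arr key 0 ((arr.length : Int) - 1) (by omega) (by omega)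
  have heq := pv_loop_eq_go arr key 0 ((arr.length : Int) - 1)
  show (if pvLoopA arr key 0 ((arr.length : Int) - 1) < 0 then (-1 : Int)
        else pvLoopA arr key 0 ((arr.length : Int) - 1)) = pvGoB arr key 0 ((arr.length : Int) - 1)
  split <;> omega
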